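-- pv_equiv track=rewrite | github.com/sinsuet/msgalaxy | visualization/review_package/iteration_builder.py | _case_contract_mode
-- ===== SOURCE A (Python) =====
-- from typing import Any, Dict, Iterable, Mapping, Sequence
--
-- def _case_contract_mode(recognized_inputs: Sequence[str]) -> str:
--     normalized = set(str(item).strip() for item in list(recognized_inputs or []) if str(item).strip())
--     if normalized == {"design_state.json"}:
--         return "design_state_only"
--     if normalized == {"field_exports"}:
--         return "field_exports_only"
--     if normalized == {"render_metadata"}:
--         return "render_metadata_only"
--     if normalized == {"field_exports", "render_metadata"}:
--         return "field_exports_render_metadata"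
--     if normalized == {"design_state.json", "field_exports"}:
--         return "design_state_field_exports"
--     if normalized == {"design_state.json", "render_metadata"}:
--         return "design_state_render_metadata"
--     if normalized >= {"design_state.json", "field_exports", "render_metadata"}:
--         return "design_state_field_exports_render_metadata"
--     return "legacy_case_mixed"
-- ===== SOURCE B (Python) =====
-- from typing import Sequence
--
-- def _case_contract_mode(recognized_inputs: Sequence[str]) -> str:
--     normalized = {str(item).strip() for item in (recognized_inputs or []) if str(item).strip()}
--     order = [("design_state.json", "design_state"),
--              ("field_exports", "field_exports"),
--              ("render_metadata", "render_metadata")]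
--     present = [label for key, label in order if key in normalized]
--     extras = normalized.difference(key for key, _ in order)
--     if len(present) == 3:
--         return "design_state_field_exports_render_metadata"
--     if extras or not present:
--         return "legacy_case_mixed"
--     if len(present) == 1:
--         return present[0] + "_only"
--     return "_".join(present)
-- ===== Notes on version B (the rewrite author's own statement) =====
-- stated objective: simpler
-- what changed: Replaces the eight-way set-equality/superset enumeration with one constructive pass: labels present in canonical order plus an extras set decide the mode (triple tolerates extras, empty/extras -> legacy, one -> '_only', else join).
import Mathlib
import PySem

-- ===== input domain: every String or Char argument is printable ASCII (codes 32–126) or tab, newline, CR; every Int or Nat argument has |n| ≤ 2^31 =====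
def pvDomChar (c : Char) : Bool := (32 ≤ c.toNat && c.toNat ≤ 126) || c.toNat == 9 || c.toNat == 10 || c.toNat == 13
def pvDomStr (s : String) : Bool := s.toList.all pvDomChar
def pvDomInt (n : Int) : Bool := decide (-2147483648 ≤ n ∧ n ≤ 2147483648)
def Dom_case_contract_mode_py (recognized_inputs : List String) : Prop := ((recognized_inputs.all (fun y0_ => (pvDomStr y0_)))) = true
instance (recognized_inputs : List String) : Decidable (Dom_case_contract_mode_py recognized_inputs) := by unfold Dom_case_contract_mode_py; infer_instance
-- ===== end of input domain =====

-- B replaces A's eight-way set-equality/superset enumeration with one constructive pass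
-- over a canonical key/label table (objective: simpler).


-- ===== PORT A =====
def case_contract_mode_py (recognized_inputs : List String) : String :=
  let normalized : PySem.Set String := PySem.Set.ofList
    (recognized_inputs.filterMap (fun item =>
      let t := PySem.Str.strip item
      if t = "" then none else some t))
  if PySem.Set.equal normalized (PySem.Set.ofList ["design_state.json"]) then "design_state_only"
  else if PySem.Set.equal normalized (PySem.Set.ofList ["field_exports"]) then "field_exports_only"
  else if PySem.Set.equal normalized (PySem.Set.ofList ["render_metadata"]) then "render_metadata_only"
  else if PySem.Set.equal normalized (PySem.Set.ofList ["field_exports", "render_metadata"]) then "field_exports_render_metadata"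
  else if PySem.Set.equal normalized (PySem.Set.ofList ["design_state.json", "field_exports"]) then "design_state_field_exports"
  else if PySem.Set.equal normalized (PySem.Set.ofList ["design_state.json", "render_metadata"]) then "design_state_render_metadata"
  else if PySem.Set.issuperset normalized (PySem.Set.ofList ["design_state.json", "field_exports", "render_metadata"]) then "design_state_field_exports_render_metadata"
  else "legacy_case_mixed"

-- ===== PORT B =====
def case_contract_mode_py_alt (recognized_inputs : List String) : String :=
  let normalized : PySem.Set String := PySem.Set.ofList
    (recognized_inputs.filterMap (fun item =>
      let t := PySem.Str.strip item
      if t = "" then none else some t))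
  let order : List (String × String) :=
    [("design_state.json", "design_state"),
     ("field_exports", "field_exports"),
     ("render_metadata", "render_metadata")]
  let present : List String := order.filterMap (fun kl => if PySem.Set.contains normalized kl.1 then some kl.2 else none)
  let extras : PySem.Set String := PySem.Set.diff normalized (order.map Prod.fst)
  if present.length = 3 then "design_state_field_exports_render_metadata"
  else if extras ≠ [] ∨ present = [] then "legacy_case_mixed"
  else if present.length = 1 then (present.headD "") ++ "_only"
  else PySem.Str.join "_" present

-- ===== PRECONDITION & SPEC =====
def Spec_case_contract_mode_py (recognized_inputs : List String) (out : String) : Prop := out = case_contract_mode_py_alt recognized_inputs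
instance (recognized_inputs : List String) (out : String) : Decidable (Spec_case_contract_mode_py recognized_inputs out) := by unfold Spec_case_contract_mode_py; infer_instance

-- ===== CLAIM (what is proved, stated in full; the proofs are below) =====
def Claim_equal_case_contract_mode_py : Prop := ∀ (recognized_inputs : List String), Dom_case_contract_mode_py recognized_inputs → Spec_case_contract_mode_py recognized_inputs (case_contract_mode_py recognized_inputs)

-- ===== LEMMAS AND PROOFS =====

theorem branches_eq (s : List String) :
    (if PySem.Set.equal s (PySem.Set.ofList ["design_state.json"]) then "design_state_only"
     else if PySem.Set.equal s (PySem.Set.ofList ["field_exports"]) then "field_exports_only"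
     else if PySem.Set.equal s (PySem.Set.ofList ["render_metadata"]) then "render_metadata_only"
     else if PySem.Set.equal s (PySem.Set.ofList ["field_exports", "render_metadata"]) then "field_exports_render_metadata"
     else if PySem.Set.equal s (PySem.Set.ofList ["design_state.json", "field_exports"]) then "design_state_field_exports"
     else if PySem.Set.equal s (PySem.Set.ofList ["design_state.json", "render_metadata"]) then "design_state_render_metadata"
     else if PySem.Set.issuperset s (PySem.Set.ofList ["design_state.json", "field_exports", "render_metadata"]) then "design_state_field_exports_render_metadata"
     else "legacy_case_mixed")
    =
    (let order : List (String × String) :=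
       [("design_state.json", "design_state"),
        ("field_exports", "field_exports"),
        ("render_metadata", "render_metadata")]
     let present : List String := order.filterMap (fun kl => if PySem.Set.contains s kl.1 then some kl.2 else none)
     let extras : PySem.Set String := PySem.Set.diff s (order.map Prod.fst)
     if present.length = 3 then "design_state_field_exports_render_metadata"
     else if extras ≠ [] ∨ present = [] then "legacy_case_mixed"
     else if present.length = 1 then (present.headD "") ++ "_only"
     else PySem.Str.join "_" present) := by
  by_cases hd : ("design_state.json" : String) ∈ s <;>
  by_cases hf : ("field_exports" : String) ∈ s <;>
  by_cases hr : ("render_metadata" : String) ∈ s <;>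
  by_cases hx : ∀ y ∈ s, y ∈ (["design_state.json", "field_exports", "render_metadata"] : List String) <;>
    simp_all [PySem.Set.equal, PySem.Set.issubset, PySem.Set.issuperset, PySem.Set.contains,
              PySem.Set.diff, PySem.Set.ofList, List.all_eq_true, List.filter_eq_nil_iff,
              List.filterMap, PySem.Str.join]
  -- 14 residual cases, in order of (hd, hf, hr, hx)
  · -- d f r present, no extras
    have n1 : ¬ ∀ x ∈ s, x = "design_state.json" := fun h => absurd (h _ hf) (by decide)
    have n2 : ¬ ∀ x ∈ s, x = "field_exports" := fun h => absurd (h _ hd) (by decide)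
    have n3 : ¬ ∀ x ∈ s, x = "render_metadata" := fun h => absurd (h _ hd) (by decide)
    have n4 : ¬ ∀ x ∈ s, x = "field_exports" ∨ x = "render_metadata" := fun h => absurd (h _ hd) (by decide)
    have n5 : ¬ ∀ x ∈ s, x = "design_state.json" ∨ x = "field_exports" := fun h => absurd (h _ hr) (by decide)
    have n6 : ¬ ∀ x ∈ s, x = "design_state.json" ∨ x = "render_metadata" := fun h => absurd (h _ hf) (by decide)
    simp [n1, n2, n3, n4, n5, n6]
  · -- d f r present, extras
    have n1 : ¬ ∀ x ∈ s, x = "design_state.json" := fun h => absurd (h _ hf) (by decide)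
    have n2 : ¬ ∀ x ∈ s, x = "field_exports" := fun h => absurd (h _ hd) (by decide)
    have n3 : ¬ ∀ x ∈ s, x = "render_metadata" := fun h => absurd (h _ hd) (by decide)
    have n4 : ¬ ∀ x ∈ s, x = "field_exports" ∨ x = "render_metadata" := fun h => absurd (h _ hd) (by decide)
    have n5 : ¬ ∀ x ∈ s, x = "design_state.json" ∨ x = "field_exports" := fun h => absurd (h _ hr) (by decide)
    have n6 : ¬ ∀ x ∈ s, x = "design_state.json" ∨ x = "render_metadata" := fun h => absurd (h _ hf) (by decide)
    simp [n1, n2, n3, n4, n5, n6]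
  · -- d f present, no extras
    have n1 : ¬ ∀ x ∈ s, x = "design_state.json" := fun h => absurd (h _ hf) (by decide)
    have n2 : ¬ ∀ x ∈ s, x = "field_exports" := fun h => absurd (h _ hd) (by decide)
    have t : ∀ x ∈ s, x = "design_state.json" ∨ x = "field_exports" := fun y hy => by
      rcases hx y hy with u | u | u
      · exact Or.inl u
      · exact Or.inr u
      · exact absurd (u ▸ hy) hr
    have hne : ¬ ∃ x ∈ s, ¬x = "design_state.json" ∧ ¬x = "field_exports" ∧ ¬x = "render_metadata" := by
      rintro ⟨x, hxs, u1, u2, u3⟩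
      rcases hx x hxs with u | u | u <;> contradiction
    rw [if_neg n1, if_neg n2, if_pos t, if_neg hne]
    decide
  · -- d f present, extras
    have n1 : ¬ ∀ x ∈ s, x = "design_state.json" := fun h => absurd (h _ hf) (by decide)
    have n2 : ¬ ∀ x ∈ s, x = "field_exports" := fun h => absurd (h _ hd) (by decide)
    have n3 : ¬ ∀ x ∈ s, x = "design_state.json" ∨ x = "field_exports" := fun h => by
      obtain ⟨x, hxs, u1, u2, u3⟩ := hx
      rcases h x hxs with u | u <;> contradiction
    simp [n1, n2, n3]
  · -- d r present, no extras
    have n1 : ¬ ∀ x ∈ s, x = "design_state.json" := fun h => absurd (h _ hr) (by decide)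
    have n2 : ¬ ∀ x ∈ s, x = "render_metadata" := fun h => absurd (h _ hd) (by decide)
    have t : ∀ x ∈ s, x = "design_state.json" ∨ x = "render_metadata" := fun y hy => by
      rcases hx y hy with u | u | u
      · exact Or.inl u
      · exact absurd (u ▸ hy) hf
      · exact Or.inr u
    have hne : ¬ ∃ x ∈ s, ¬x = "design_state.json" ∧ ¬x = "field_exports" ∧ ¬x = "render_metadata" := by
      rintro ⟨x, hxs, u1, u2, u3⟩
      rcases hx x hxs with u | u | u <;> contradiction
    rw [if_neg n1, if_neg n2, if_pos t, if_neg hne]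
    decide
  · -- d r present, extras
    have n1 : ¬ ∀ x ∈ s, x = "design_state.json" := fun h => absurd (h _ hr) (by decide)
    have n2 : ¬ ∀ x ∈ s, x = "render_metadata" := fun h => absurd (h _ hd) (by decide)
    have n3 : ¬ ∀ x ∈ s, x = "design_state.json" ∨ x = "render_metadata" := fun h => by
      obtain ⟨x, hxs, u1, u2, u3⟩ := hx
      rcases h x hxs with u | u <;> contradiction
    simp [n1, n2, n3]
  · -- d present only, no extras
    have t : ∀ x ∈ s, x = "design_state.json" := fun y hy => by
      rcases hx y hy with u | u | u
      · exact u
      · exact absurd (u ▸ hy) hf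
      · exact absurd (u ▸ hy) hr
    have hne : ¬ ∃ x ∈ s, ¬x = "design_state.json" ∧ ¬x = "field_exports" ∧ ¬x = "render_metadata" := by
      rintro ⟨x, hxs, u1, u2, u3⟩
      rcases hx x hxs with u | u | u <;> contradiction
    rw [if_pos t, if_neg hne]
  · -- d present only, extras
    obtain ⟨x, hxs, u1, u2, u3⟩ := hx
    exact ⟨x, hxs, u1⟩
  · -- f r present, no extras
    have n1 : ¬ ∀ x ∈ s, x = "field_exports" := fun h => absurd (h _ hr) (by decide)
    have n2 : ¬ ∀ x ∈ s, x = "render_metadata" := fun h => absurd (h _ hf) (by decide)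
    have t : ∀ x ∈ s, x = "field_exports" ∨ x = "render_metadata" := fun y hy => by
      rcases hx y hy with u | u | u
      · exact absurd (u ▸ hy) hd
      · exact Or.inl u
      · exact Or.inr u
    have hne : ¬ ∃ x ∈ s, ¬x = "design_state.json" ∧ ¬x = "field_exports" ∧ ¬x = "render_metadata" := by
      rintro ⟨x, hxs, u1, u2, u3⟩
      rcases hx x hxs with u | u | u <;> contradiction
    rw [if_neg n1, if_neg n2, if_pos t, if_neg hne]
    decide
  · -- f r present, extras
    have n1 : ¬ ∀ x ∈ s, x = "field_exports" := fun h => absurd (h _ hr) (by decide)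
    have n2 : ¬ ∀ x ∈ s, x = "render_metadata" := fun h => absurd (h _ hf) (by decide)
    have n3 : ¬ ∀ x ∈ s, x = "field_exports" ∨ x = "render_metadata" := fun h => by
      obtain ⟨x, hxs, u1, u2, u3⟩ := hx
      rcases h x hxs with u | u <;> contradiction
    simp [n1, n2, n3]
  · -- f present only, no extras
    have t : ∀ x ∈ s, x = "field_exports" := fun y hy => by
      rcases hx y hy with u | u | u
      · exact absurd (u ▸ hy) hd
      · exact u
      · exact absurd (u ▸ hy) hr
    have hne : ¬ ∃ x ∈ s, ¬x = "design_state.json" ∧ ¬x = "field_exports" ∧ ¬x = "render_metadata" := by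
      rintro ⟨x, hxs, u1, u2, u3⟩
      rcases hx x hxs with u | u | u <;> contradiction
    rw [if_pos t, if_neg hne]
  · -- f present only, extras
    obtain ⟨x, hxs, u1, u2, u3⟩ := hx
    exact ⟨x, hxs, u2⟩
  · -- r present only, no extras
    have t : ∀ x ∈ s, x = "render_metadata" := fun y hy => by
      rcases hx y hy with u | u | u
      · exact absurd (u ▸ hy) hd
      · exact absurd (u ▸ hy) hf
      · exact u
    have hne : ¬ ∃ x ∈ s, ¬x = "design_state.json" ∧ ¬x = "field_exports" ∧ ¬x = "render_metadata" := by
      rintro ⟨x, hxs, u1, u2, u3⟩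
      rcases hx x hxs with u | u | u <;> contradiction
    rw [if_pos t, if_neg hne]
  · -- r present only, extras
    obtain ⟨x, hxs, u1, u2, u3⟩ := hx
    exact ⟨x, hxs, u3⟩

-- ===== VERDICT (by name: the statement is the Claim_ definition above) =====
theorem case_contract_mode_py_spec : Claim_equal_case_contract_mode_py := by
  intro ri _
  unfold Spec_case_contract_mode_py case_contract_mode_py case_contract_mode_py_alt
  exact branches_eq _
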